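-- pv_equiv track=rewrite | github.com/MX1MR41/A2SV | phase-06/week-76/leetcode/minimum-absolute-difference-in-sliding-submatrix.py | minAbsDiff
-- ===== SOURCE A (Python) =====
-- from typing import List
--
-- def minAbsDiff(grid: List[List[int]], k: int) -> List[List[int]]:
--     m, n = len(grid), len(grid[0])
--
--     res = []
--
--     for i in range(m - k + 1):
--         row = []
--         for j in range(n - k + 1):
--
--             nums = set()
--             for p in range(i, i + k):
--                 for q in range(j, j + k):
--                     nums.add(grid[p][q])
--
--             nums = sorted(list(nums))
--
--
--             curr = float("inf")
--
--             for z in range(1, len(nums)):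
--                 curr = min(curr, nums[z] - nums[z - 1])
--
--             if len(nums) == 1:
--                 curr = 0
--
--             row.append(curr)
--
--         res.append(row)
--
--     return res
-- ===== SOURCE B (Python) =====
-- from typing import List
--
-- def minAbsDiff(grid: List[List[int]], k: int) -> List[List[int]]:
--     m, n = len(grid), len(grid[0])
--     out = []
--     for i in range(m - k + 1):
--         row = []
--         for j in range(n - k + 1):
--             cells = [v for r in grid[i:i + k] for v in r[j:j + k]]
--             best = 0  # 0 = no differing pair seen yet
--             rest = cells
--             while rest:
--                 a, rest = rest[0], rest[1:]
--                 for b in rest: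
--                     if a != b:
--                         d = abs(a - b)
--                         if best == 0 or d < best:
--                             best = d
--             row.append(best)
--         out.append(row)
--     return out
-- ===== Notes on version B (the rewrite author's own statement) =====
-- stated objective: alternative
-- what changed: B never sorts and never dedups: per k*k window it brute-force scans all unordered pairs of cells keeping the minimum nonzero |a-b| (0 sentinel for all-equal windows), using the identity that the min pairwise positive difference equals the min adjacent gap of the sorted distinct values.
-- outside the precondition, e.g. on minAbsDiff([[1, 2]], 0): A returns [[inf, inf, inf], [inf, inf, inf]], B returns [[0, 0, 0], [0, 0, 0]]; on minAbsDiff([[1, 2], [3]], 2): A raises IndexError, B returns [[1]]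
import Mathlib
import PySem

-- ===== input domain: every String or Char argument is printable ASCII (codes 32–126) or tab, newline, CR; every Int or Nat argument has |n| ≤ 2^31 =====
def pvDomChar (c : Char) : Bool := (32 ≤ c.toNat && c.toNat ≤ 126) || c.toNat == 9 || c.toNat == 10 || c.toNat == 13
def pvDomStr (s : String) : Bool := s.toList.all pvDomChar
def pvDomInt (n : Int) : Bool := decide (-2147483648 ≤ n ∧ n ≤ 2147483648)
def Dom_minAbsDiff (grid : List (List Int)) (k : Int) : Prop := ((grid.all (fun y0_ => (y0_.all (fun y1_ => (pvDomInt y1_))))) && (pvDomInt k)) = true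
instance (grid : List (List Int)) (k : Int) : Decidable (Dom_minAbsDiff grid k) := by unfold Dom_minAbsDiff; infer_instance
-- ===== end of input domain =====

-- B replaces A's per-window "dedupe into a set, sort, scan adjacent gaps, special-case a
-- singleton" by a sort-free, dedup-free brute-force scan over all unordered pairs of window
-- cells keeping the minimum nonzero |a-b| (0 sentinel): a different algorithm, same values.

-- ===== PORT A =====
def minAbsDiff (grid : List (List Int)) (k : Int) : List (List Int) :=
  let m : Int := grid.length
  let n : Int := (grid.headD []).length   -- grid[0]; Pre_ excludes the empty grid (IndexError)
  (PySem.List.pyRange 0 (m - k + 1) 1).foldl (fun res i =>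
    res ++ [
      (PySem.List.pyRange 0 (n - k + 1) 1).foldl (fun row j =>
        let nums : PySem.Set Int :=
          (PySem.List.pyRange i (i + k) 1).foldl (fun s p =>
            (PySem.List.pyRange j (j + k) 1).foldl (fun s q =>
              PySem.Set.add s (PySem.List.pyGetD (PySem.List.pyGetD grid p []) q 0)) s)
            PySem.Set.empty
        -- grid[p][q]: in range under Pre_ (the pyGetD defaults are never read)
        let nums2 : List Int := PySem.List.sorted nums (fun x => x)
        -- curr : Option Int models float("inf") as none; min(curr, gap) is the running min
        let curr : Option Int :=
          (PySem.List.pyRange 1 (nums2.length : Int) 1).foldl (fun c z =>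
            some (match c with
              | none => PySem.List.pyGetD nums2 z 0 - PySem.List.pyGetD nums2 (z - 1) 0
              | some v => min v (PySem.List.pyGetD nums2 z 0 - PySem.List.pyGetD nums2 (z - 1) 0))) none
        -- 'if len(nums) == 1: curr = 0'; the '.getD 0' is only reached when nums2 = [], excluded by Pre_
        row ++ [if nums2.length = 1 then 0 else curr.getD 0]) [] ]) []

-- ===== PORT B =====
-- B's 'while rest: a, rest = rest[0], rest[1:]; for b in rest: …' loop, step for step
-- (abs (a - b) for ints is 'if a < b then b - a else a - b')
def pvPairScan : List Int → Int → Int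
  | [], best => best
  | a :: rest, best =>
      pvPairScan rest
        (rest.foldl (fun best b =>
          if a ≠ b then
            (let d := if a < b then b - a else a - b
             if best = 0 ∨ d < best then d else best)
          else best) best)

def minAbsDiff_alt (grid : List (List Int)) (k : Int) : List (List Int) :=
  let m : Int := grid.length
  let n : Int := (grid.headD []).length
  (PySem.List.pyRange 0 (m - k + 1) 1).map (fun i =>
    (PySem.List.pyRange 0 (n - k + 1) 1).map (fun j =>
      -- cells = [v for r in grid[i:i+k] for v in r[j:j+k]]
      let cells : List Int :=
        ((PySem.List.slice grid (some i) (some (i + k))).map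
          (fun r => PySem.List.slice r (some j) (some (j + k)))).flatten
      pvPairScan cells 0))

-- ===== PRECONDITION & SPEC =====
-- Pre_ excludes exactly the inputs where Python A raises or leaves the int type:
-- empty grid (grid[0] raises IndexError), k ≤ 0 (empty windows make curr stay float('inf'),
-- not an int), and ragged grids in which a window reaches a row shorter than row 0
-- (grid[p][q] raises IndexError).
def Pre_minAbsDiff (grid : List (List Int)) (k : Int) : Prop :=
  grid ≠ [] ∧ 1 ≤ k ∧
    (k ≤ (grid.length : Int) ∧ k ≤ (((grid.headD []).length : Nat) : Int) →
      ∀ r ∈ grid, (grid.headD []).length ≤ r.length)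
instance (grid : List (List Int)) (k : Int) : Decidable (Pre_minAbsDiff grid k) := by
  unfold Pre_minAbsDiff; infer_instance

def pvWitness_minAbsDiff : List (List Int) × Int := ([[1, 2, 3], [4, 0, 4]], 2)

def Spec_minAbsDiff (grid : List (List Int)) (k : Int) (out : List (List Int)) : Prop := out = minAbsDiff_alt grid k
instance (grid : List (List Int)) (k : Int) (out : List (List Int)) : Decidable (Spec_minAbsDiff grid k out) := by unfold Spec_minAbsDiff; infer_instance

-- ===== CLAIM (what is proved, stated in full; the proofs are below) =====
def Claim_equal_minAbsDiff : Prop := ∀ (grid : List (List Int)) (k : Int), Dom_minAbsDiff grid k → Pre_minAbsDiff grid k → Spec_minAbsDiff grid k (minAbsDiff grid k)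

-- ===== LEMMAS AND PROOFS =====

-- adjacent differences of a list
def pvGaps (xs : List Int) : List Int := (xs.zip xs.tail).map (fun ab => ab.2 - ab.1)

-- adjacent dedup (= the sorted distinct values, when the input is sorted)
def pvDD : List Int → List Int
  | [] => []
  | [a] => [a]
  | a :: b :: t => if a = b then pvDD (b :: t) else a :: pvDD (b :: t)

-- A's loop body on a gap (none = float('inf'))
def pvMstep (c : Option Int) (d : Int) : Option Int :=
  some (match c with | none => d | some v => min v d)

-- the 0-sentinel running minimum of the positive candidates
def pvStep0 (best d : Int) : Int := if d ≠ 0 ∧ (best = 0 ∨ d < best) then d else best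

def pvRep : Option Int → Int
  | none => 0
  | some x => x

-- |x - y| over the tail-pairs of a list: the candidates B's pair scan minimises over
def pvPairDiffs : List Int → List Int
  | [] => []
  | a :: rest => rest.map (fun b => if a < b then b - a else a - b) ++ pvPairDiffs rest

theorem pvGaps_cons₂ (a b : Int) (t : List Int) :
    pvGaps (a :: b :: t) = (b - a) :: pvGaps (b :: t) := rfl

theorem mem_pvDD (v : List Int) (x : Int) : x ∈ pvDD v ↔ x ∈ v := by
  induction v with
  | nil => simp [pvDD]
  | cons a t ih =>
    cases t with
    | nil => simp [pvDD]
    | cons b t' =>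
      by_cases hab : a = b
      · subst hab
        rw [pvDD, if_pos rfl, ih]
        simp
      · simp [pvDD, hab, ih]

theorem pairwise_lt_pvDD (v : List Int) (h : v.Pairwise (· ≤ ·)) :
    (pvDD v).Pairwise (· < ·) := by
  induction v with
  | nil => simp [pvDD]
  | cons a t ih =>
    cases t with
    | nil => simp [pvDD]
    | cons b t' =>
      rcases List.pairwise_cons.1 h with ⟨ha, ht⟩
      by_cases hab : a = b
      · simpa [pvDD, hab] using ih ht
      · have hab' : a < b := lt_of_le_of_ne (ha b (by simp)) hab
        rw [pvDD, if_neg hab]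
        refine List.pairwise_cons.2 ⟨?_, ih ht⟩
        intro y hy
        rw [mem_pvDD] at hy
        rcases List.mem_cons.1 hy with rfl | hy'
        · exact hab'
        · exact lt_of_lt_of_le hab' ((List.pairwise_cons.1 ht).1 y hy')

theorem pvDD_cons_head (t : List Int) (b : Int) : ∃ r, pvDD (b :: t) = b :: r := by
  induction t generalizing b with
  | nil => exact ⟨[], rfl⟩
  | cons c t' ih =>
    by_cases hbc : b = c
    · subst hbc
      rcases ih b with ⟨r, hr⟩
      exact ⟨r, by rw [pvDD, if_pos rfl, hr]⟩
    · exact ⟨pvDD (c :: t'), by rw [pvDD, if_neg hbc]⟩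

theorem isSome_foldl_pvMstep (gs : List Int) (c : Option Int) (h : c.isSome) :
    (gs.foldl pvMstep c).isSome := by
  induction gs generalizing c with
  | nil => exact h
  | cons d gs ih => exact ih _ (by simp [pvMstep])

-- on a sorted list, the zero-skipping scan over all gaps equals
-- A's min-scan over the gaps of the deduplicated list
theorem pvCore (t : List Int) (a : Int) (c : Option Int)
    (hs : (a :: t).Pairwise (· ≤ ·)) (hc : ∀ x, c = some x → 0 < x) :
    (pvGaps (a :: t)).foldl pvStep0 (pvRep c) = pvRep ((pvGaps (pvDD (a :: t))).foldl pvMstep c) := by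
  induction t generalizing a c with
  | nil => rfl
  | cons b t' ih =>
    rcases List.pairwise_cons.1 hs with ⟨ha, ht⟩
    by_cases hab : a = b
    · subst hab
      rw [pvDD, if_pos rfl, pvGaps_cons₂]
      have : pvStep0 (pvRep c) (a - a) = pvRep c := by
        simp [pvStep0]
      rw [List.foldl_cons, this]
      exact ih a c ht hc
    · have hab' : a < b := lt_of_le_of_ne (ha b (by simp)) hab
      have hd : 0 < b - a := by omega
      rw [pvDD, if_neg hab, pvGaps_cons₂]
      have hstep : pvStep0 (pvRep c) (b - a) = pvRep (pvMstep c (b - a)) := by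
        cases c with
        | none => simp [pvStep0, pvMstep, pvRep, hd.ne']
        | some x =>
          have hx : 0 < x := hc x rfl
          by_cases hdx : b - a < x
          · have hmin : min x (b - a) = b - a := min_eq_right (le_of_lt hdx)
            simp [pvStep0, pvMstep, pvRep, hd.ne', hdx, hmin, hx.ne']
          · have hmin : min x (b - a) = x := min_eq_left (by omega)
            simp [pvStep0, pvMstep, pvRep, hd.ne', hdx, hmin, hx.ne']
      rw [List.foldl_cons, hstep]
      rcases pvDD_cons_head t' b with ⟨r, hr⟩
      rw [hr, pvGaps_cons₂, List.foldl_cons]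
      have := ih b (pvMstep c (b - a)) ht ?_
      · rw [hr] at this; exact this
      · intro x hx
        cases c with
        | none => simp [pvMstep] at hx; omega
        | some y =>
          have hy : 0 < y := hc y rfl
          simp [pvMstep] at hx
          subst hx
          exact lt_min hy hd

-- the index loop 'for z in range(1, len(ns))' reads exactly the adjacent gaps
theorem pvGapsA (ns : List Int) :
    (PySem.List.pyRange 1 (ns.length : Int) 1).map
      (fun z => PySem.List.pyGetD ns z 0 - PySem.List.pyGetD ns (z - 1) 0) = pvGaps ns := by
  apply List.ext_getElem
  · simp only [List.length_map, PySem.List.length_pyRange_one, pvGaps, List.length_zip,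
      List.length_tail]
    omega
  · intro q h1 h2
    simp only [List.length_map, PySem.List.length_pyRange_one] at h1
    simp only [List.length_map, pvGaps, List.length_zip, List.length_tail] at h2
    simp only [List.getElem_map, PySem.List.getElem_pyRange_one, pvGaps, List.getElem_zip]
    have hq : q + 1 < ns.length := by omega
    rw [PySem.List.pyGetD_eq_getElem ns 0 (by omega) (by omega),
        PySem.List.pyGetD_eq_getElem ns 0 (by omega) (by omega)]
    rw [List.getElem_tail]
    congr 2 <;> omega

-- reading a range of indices is slicing
theorem map_pyGetD_range_eq_slice {α : Type} (xs : List α) (d : α) (a b : Int)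
    (h0 : 0 ≤ a) (hb0 : 0 ≤ b) (hb : b ≤ (xs.length : Int)) :
    (PySem.List.pyRange a b 1).map (fun q => PySem.List.pyGetD xs q d)
      = PySem.List.slice xs (some a) (some b) := by
  rw [PySem.List.slice_toNat xs h0 hb0]
  by_cases hba : b ≤ a
  · rw [PySem.List.pyRange_one_eq_nil hba]
    have : b.toNat - a.toNat = 0 := by omega
    simp [this]
  · apply List.ext_getElem
    · simp only [List.length_map, PySem.List.length_pyRange_one, List.length_take,
        List.length_drop]
      omega
    · intro q h1 h2
      simp only [List.length_map, PySem.List.length_pyRange_one] at h1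
      simp only [List.getElem_map, PySem.List.getElem_pyRange_one]
      rw [PySem.List.pyGetD_eq_getElem xs d (by omega) (by omega)]
      rw [List.getElem_take, List.getElem_drop]
      congr 1
      omega

theorem foldl_update_flatten (L : List (List Int)) (s : PySem.Set Int) :
    L.foldl (fun s r => PySem.Set.update s r) s = PySem.Set.update s L.flatten := by
  induction L generalizing s with
  | nil => simp [PySem.Set.update]
  | cons r L ih =>
    rw [List.foldl_cons, ih, List.flatten_cons]
    simp [PySem.Set.update, List.foldl_append]

-- B's pair scan is the 0-sentinel fold over the tail-pair |differences|
theorem pvPairScan_eq_foldl (l : List Int) (b0 : Int) :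
    pvPairScan l b0 = (pvPairDiffs l).foldl pvStep0 b0 := by
  induction l generalizing b0 with
  | nil => rfl
  | cons a rest ih =>
    rw [pvPairScan, ih, pvPairDiffs, List.foldl_append, List.foldl_map]
    congr 1
    apply PySem.List.foldl_congr_mem
    intro best b _
    by_cases hab : a = b
    · subst hab; simp [pvStep0]
    · have hd : (if a < b then b - a else a - b) ≠ 0 := by split <;> omega
      simp only [pvStep0, hab, hd, ne_eq, not_false_iff, true_and, if_true]

-- every tail-pair |difference| is a |x - y| of two members
theorem pvPairDiffs_mem (l : List Int) (d : Int) (hd : d ∈ pvPairDiffs l) :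
    ∃ x ∈ l, ∃ y ∈ l, d = if x < y then y - x else x - y := by
  induction l with
  | nil => cases hd
  | cons a rest ih =>
    rw [pvPairDiffs, List.mem_append] at hd
    rcases hd with hd | hd
    · rcases List.mem_map.1 hd with ⟨b, hb, rfl⟩
      exact ⟨a, by simp, b, by simp [hb], rfl⟩
    · rcases ih hd with ⟨x, hx, y, hy, h⟩
      exact ⟨x, by simp [hx], y, by simp [hy], h⟩

-- two distinct members give their |difference| as a tail-pair candidate
theorem pvPairDiffs_of_mem (l : List Int) (x y : Int) (hx : x ∈ l) (hy : y ∈ l) (hxy : x ≠ y) :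
    (if x < y then y - x else x - y) ∈ pvPairDiffs l := by
  induction l with
  | nil => cases hx
  | cons a rest ih =>
    rw [pvPairDiffs, List.mem_append]
    rcases List.mem_cons.1 hx with rfl | hx'
    · rcases List.mem_cons.1 hy with rfl | hy'
      · exact absurd rfl hxy
      · exact Or.inl (List.mem_map.2 ⟨y, hy', rfl⟩)
    · rcases List.mem_cons.1 hy with rfl | hy'
      · refine Or.inl (List.mem_map.2 ⟨x, hx', ?_⟩)
        rcases lt_trichotomy x y with h | h | h
        · simp [h, not_lt.2 (le_of_lt h)]
        · exact absurd h hxy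
        · simp [h, not_lt.2 (le_of_lt h)]
      · exact Or.inr (ih hx' hy')

-- every gap is y - x for two members
theorem pvGaps_mem (w : List Int) (g : Int) (hg : g ∈ pvGaps w) :
    ∃ x ∈ w, ∃ y ∈ w, g = y - x := by
  induction w with
  | nil => cases hg
  | cons a t ih =>
    cases t with
    | nil => cases hg
    | cons b t' =>
      rw [pvGaps_cons₂, List.mem_cons] at hg
      rcases hg with rfl | hg'
      · exact ⟨a, by simp, b, by simp, rfl⟩
      · rcases ih hg' with ⟨x, hx, y, hy, h⟩
        exact ⟨x, by simp [hx], y, by simp [hy], h⟩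

-- gaps of a sorted list are nonnegative
theorem pvGaps_nonneg (w : List Int) (hw : w.Pairwise (· ≤ ·)) :
    ∀ g ∈ pvGaps w, 0 ≤ g := by
  induction w with
  | nil => intro g hg; cases hg
  | cons a t ih =>
    cases t with
    | nil => intro g hg; cases hg
    | cons b t' =>
      rcases List.pairwise_cons.1 hw with ⟨ha, ht⟩
      intro g hg
      rw [pvGaps_cons₂, List.mem_cons] at hg
      rcases hg with rfl | hg'
      · have := ha b (by simp); omega
      · exact ih ht g hg'

-- on a sorted list, any two members x < y dominate a positive adjacent gap
theorem pvGap_below (w : List Int) (hw : w.Pairwise (· ≤ ·)) :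
    ∀ x y, x ∈ w → y ∈ w → x < y → ∃ g ∈ pvGaps w, 0 < g ∧ g ≤ y - x := by
  induction w with
  | nil => intro x y hx _ _; cases hx
  | cons a t ih =>
    rcases List.pairwise_cons.1 hw with ⟨ha, ht⟩
    have step : ∀ x' y', x' ∈ t → y' ∈ t → x' < y' →
        ∃ g ∈ pvGaps (a :: t), 0 < g ∧ g ≤ y' - x' := by
      intro x' y' hx' hy' hlt
      rcases ih ht x' y' hx' hy' hlt with ⟨g, hg, h1, h2⟩
      refine ⟨g, ?_, h1, h2⟩
      cases t with
      | nil => cases hg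
      | cons b t' => rw [pvGaps_cons₂]; exact List.mem_cons_of_mem _ hg
    intro x y hx hy hxy
    rcases List.mem_cons.1 hx with rfl | hx'
    · rcases List.mem_cons.1 hy with rfl | hy'
      · omega
      · cases t with
        | nil => cases hy'
        | cons b t' =>
          rcases List.pairwise_cons.1 ht with ⟨hb, _⟩
          have hby : b ≤ y := by
            rcases List.mem_cons.1 hy' with rfl | h
            · exact le_refl y
            · exact hb y h
          by_cases hab : x = b
          · exact step x y (hab ▸ List.mem_cons_self) hy' hxy
          · have haxb : x < b := lt_of_le_of_ne (ha b (by simp)) hab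
            exact ⟨b - x, by rw [pvGaps_cons₂]; simp, by omega, by omega⟩
    · rcases List.mem_cons.1 hy with rfl | hy'
      · have := ha x hx'; omega
      · exact step x y hx' hy' hxy

-- characterisation of the 0-sentinel minimum fold on nonnegative candidates
theorem pvSfold_inv (ds : List Int) (b : Int) (hb : 0 ≤ b) (hds : ∀ d ∈ ds, 0 ≤ d) :
    (ds.foldl pvStep0 b = b ∨ (ds.foldl pvStep0 b ∈ ds ∧ 0 < ds.foldl pvStep0 b)) ∧
    (∀ d ∈ ds, 0 < d → 0 < ds.foldl pvStep0 b ∧ ds.foldl pvStep0 b ≤ d) ∧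
    (0 < b → 0 < ds.foldl pvStep0 b ∧ ds.foldl pvStep0 b ≤ b) := by
  induction ds generalizing b with
  | nil =>
    refine ⟨Or.inl rfl, ?_, fun h => ⟨h, le_refl b⟩⟩
    intro d hd; cases hd
  | cons d ds ih =>
    have hd0 : 0 ≤ d := hds d (by simp)
    have hds' : ∀ e ∈ ds, 0 ≤ e := fun e he => hds e (by simp [he])
    have hb' : 0 ≤ pvStep0 b d := by unfold pvStep0; split <;> omega
    obtain ⟨ihm, ihmin, ihb⟩ := ih (pvStep0 b d) hb' hds'
    have h1 : 0 < d → 0 < pvStep0 b d ∧ pvStep0 b d ≤ d := by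
      unfold pvStep0; split <;> omega
    have h2 : 0 < b → 0 < pvStep0 b d ∧ pvStep0 b d ≤ b := by
      unfold pvStep0; split <;> omega
    have h3 : pvStep0 b d = b ∨ (pvStep0 b d = d ∧ 0 < d) := by
      unfold pvStep0; split
      · exact Or.inr ⟨rfl, by omega⟩
      · exact Or.inl rfl
    rw [List.foldl_cons]
    refine ⟨?_, ?_, ?_⟩
    · rcases ihm with h | h
      · rw [h]
        rcases h3 with h3 | ⟨h3, hpos⟩
        · exact Or.inl h3
        · exact Or.inr ⟨by rw [h3]; simp, by omega⟩
      · exact Or.inr ⟨List.mem_cons_of_mem _ h.1, h.2⟩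
    · intro e he hepos
      rcases List.mem_cons.1 he with h | h
      · subst h
        rcases h1 hepos with ⟨p1, p2⟩
        rcases ihb p1 with ⟨q1, q2⟩
        exact ⟨q1, le_trans q2 p2⟩
      · exact ihmin e h hepos
    · intro hbpos
      rcases h2 hbpos with ⟨p1, p2⟩
      rcases ihb p1 with ⟨q1, q2⟩
      exact ⟨q1, le_trans q2 p2⟩

-- the heart of the B-side proof: the pair scan on the raw multiset equals the
-- zero-skipping gap scan on the sorted multiset
theorem pvPairScan_eq_gapScan (l : List Int) :
    pvPairScan l 0 = (pvGaps (PySem.List.sorted l (fun x => x))).foldl pvStep0 0 := by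
  set w := PySem.List.sorted l (fun x => x) with hw
  have hwp : w.Pairwise (· ≤ ·) := PySem.List.sorted_pairwise l (fun x => x)
  have hmem : ∀ x, x ∈ w ↔ x ∈ l := fun x =>
    (PySem.List.sorted_perm l (fun x => x) false).mem_iff
  rw [pvPairScan_eq_foldl]
  have hP0 : ∀ d ∈ pvPairDiffs l, 0 ≤ d := by
    intro d hd
    rcases pvPairDiffs_mem l d hd with ⟨x, _, y, _, rfl⟩
    split <;> omega
  have hG0 : ∀ g ∈ pvGaps w, 0 ≤ g := pvGaps_nonneg w hwp
  obtain ⟨Pm, Pmin, _⟩ := pvSfold_inv (pvPairDiffs l) 0 (le_refl 0) hP0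
  obtain ⟨Gm, Gmin, _⟩ := pvSfold_inv (pvGaps w) 0 (le_refl 0) hG0
  set rP := (pvPairDiffs l).foldl pvStep0 0
  set rG := (pvGaps w).foldl pvStep0 0
  -- a positive candidate on either side yields one on the other, bounded by it
  have PtoG : ∀ d ∈ pvPairDiffs l, 0 < d → ∃ g ∈ pvGaps w, 0 < g ∧ g ≤ d := by
    intro d hd hdpos
    rcases pvPairDiffs_mem l d hd with ⟨x, hx, y, hy, rfl⟩
    rcases lt_trichotomy x y with h | h | h
    · rw [if_pos h]
      exact pvGap_below w hwp x y ((hmem x).2 hx) ((hmem y).2 hy) h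
    · subst h; simp at hdpos
    · rw [if_neg (not_lt.2 (le_of_lt h))]
      exact pvGap_below w hwp y x ((hmem y).2 hy) ((hmem x).2 hx) h
  have GtoP : ∀ g ∈ pvGaps w, 0 < g → g ∈ pvPairDiffs l := by
    intro g hg hgpos
    rcases pvGaps_mem w g hg with ⟨x, hx, y, hy, rfl⟩
    have hxy : x < y := by omega
    have := pvPairDiffs_of_mem l x y ((hmem x).1 hx) ((hmem y).1 hy) (by omega)
    rwa [if_pos hxy] at this
  rcases Pm with hP | ⟨hPmem, hPpos⟩
  · -- rP = 0: no positive pair diff, hence no positive gap, hence rG = 0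
    rcases Gm with hG | ⟨hGmem, hGpos⟩
    · rw [hP, hG]
    · exfalso
      have hin := GtoP rG hGmem hGpos
      have := (Pmin rG hin hGpos).1
      omega
  · rcases PtoG rP hPmem hPpos with ⟨g, hg, hgpos, hgle⟩
    have hGle : rG ≤ rP := le_trans (Gmin g hg hgpos).2 hgle
    have hGpos : 0 < rG := (Gmin g hg hgpos).1
    rcases Gm with hG | ⟨hGmem, _⟩
    · omega
    · have hin := GtoP rG hGmem hGpos
      have hPle : rP ≤ rG := (Pmin rG hin hGpos).2
      omega

-- per-window value of A, as a function of the window's multiset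
theorem windowA_eq (l : List Int) (hne : l ≠ []) :
    (if (PySem.List.sorted (PySem.Set.ofList l) (fun x => x)).length = 1 then 0
     else ((pvGaps (PySem.List.sorted (PySem.Set.ofList l) (fun x => x))).foldl pvMstep none).getD 0)
    = (pvGaps (PySem.List.sorted l (fun x => x))).foldl pvStep0 0 := by
  set v := PySem.List.sorted l (fun x => x) with hv
  have hvne : v ≠ [] := by
    rw [hv, Ne, PySem.List.sorted_eq_nil_iff]; exact hne
  have hvp : v.Pairwise (· ≤ ·) := PySem.List.sorted_pairwise l (fun x => x)
  have hns : PySem.List.sorted (PySem.Set.ofList l) (fun x => x) = pvDD v := by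
    apply PySem.List.sorted_eq_of_perm_of_pairwise_lt
    · rw [List.perm_ext_iff_of_nodup (pairwise_lt_pvDD v hvp).nodup (PySem.Set.nodup_ofList l)]
      intro x
      rw [mem_pvDD, PySem.Set.mem_ofList, hv]
      exact ⟨fun h => (PySem.List.sorted_perm l (fun x => x) false).mem_iff.1 h,
             fun h => (PySem.List.sorted_perm l (fun x => x) false).mem_iff.2 h⟩
    · exact pairwise_lt_pvDD v hvp
  rw [hns]
  obtain ⟨a, t, hvat⟩ := List.exists_cons_of_ne_nil hvne
  have hcore : (pvGaps (a :: t)).foldl pvStep0 0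
      = pvRep ((pvGaps (pvDD (a :: t))).foldl pvMstep none) :=
    pvCore t a none (hvat ▸ hvp) (by intro x h; cases h)
  rw [hvat, hcore]
  rcases pvDD_cons_head t a with ⟨r, hr⟩
  cases r with
  | nil => simp [hr, pvGaps, pvRep]
  | cons y r' =>
    rw [hr, pvGaps_cons₂, List.foldl_cons]
    have hlen : (a :: y :: r').length ≠ 1 := by simp
    rw [if_neg hlen]
    -- the accumulator after the first gap is some _, so the fold's result is some _
    rcases Option.isSome_iff_exists.1
      (isSome_foldl_pvMstep (pvGaps (y :: r')) (pvMstep none (y - a)) (by simp [pvMstep])) with ⟨x, hx⟩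
    rw [hx]
    rfl

-- A's nested index loops build exactly the set of the window's sliced multiset
theorem windowNums_eq (grid : List (List Int)) (i j k : Int)
    (hi0 : 0 ≤ i) (hik : i + k ≤ (grid.length : Int)) (hj0 : 0 ≤ j) (hk : 1 ≤ k)
    (hjk : j + k ≤ (((grid.headD []).length : Nat) : Int))
    (hrows : ∀ r ∈ grid, (grid.headD []).length ≤ r.length) :
    (PySem.List.pyRange i (i + k) 1).foldl (fun s p =>
      (PySem.List.pyRange j (j + k) 1).foldl (fun s q =>
        PySem.Set.add s (PySem.List.pyGetD (PySem.List.pyGetD grid p []) q 0)) s)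
      PySem.Set.empty
    = PySem.Set.ofList (((PySem.List.slice grid (some i) (some (i + k))).map
        (fun r => PySem.List.slice r (some j) (some (j + k)))).flatten) := by
  have hbody : (fun (s : PySem.Set Int) (p : Int) =>
      (PySem.List.pyRange j (j + k) 1).foldl (fun s q =>
        PySem.Set.add s (PySem.List.pyGetD (PySem.List.pyGetD grid p []) q 0)) s)
      = (fun (s : PySem.Set Int) (p : Int) =>
        PySem.Set.update s ((PySem.List.pyRange j (j + k) 1).map
          (fun q => PySem.List.pyGetD (PySem.List.pyGetD grid p []) q 0))) := by
    funext s p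
    exact (PySem.Set.update_map_eq_foldl_add _ _ _).symm
  rw [hbody, ← List.foldl_map (f := fun p => (PySem.List.pyRange j (j + k) 1).map
        (fun q => PySem.List.pyGetD (PySem.List.pyGetD grid p []) q 0))
      (g := fun (s : PySem.Set Int) r => PySem.Set.update s r),
    foldl_update_flatten,
    show (PySem.Set.empty : PySem.Set Int) = [] from rfl, PySem.Set.update_nil_left]
  congr 1
  have hmm : (PySem.List.pyRange i (i + k) 1).map
      (fun p => (PySem.List.pyRange j (j + k) 1).map
        (fun q => PySem.List.pyGetD (PySem.List.pyGetD grid p []) q 0))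
      = ((PySem.List.pyRange i (i + k) 1).map (fun p => PySem.List.pyGetD grid p [])).map
        (fun r => (PySem.List.pyRange j (j + k) 1).map (fun q => PySem.List.pyGetD r q 0)) := by
    rw [List.map_map]
    rfl
  rw [hmm, map_pyGetD_range_eq_slice grid [] i (i + k) hi0 (by omega) hik]
  congr 1
  apply List.map_congr_left
  intro r hr
  have hrg : r ∈ grid := PySem.List.mem_of_mem_slice grid _ _ hr
  have hrl : ((grid.headD []).length : Int) ≤ (r.length : Int) := by
    exact_mod_cast hrows r hrg
  exact map_pyGetD_range_eq_slice r 0 j (j + k) hj0 (by omega) (by omega)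

-- the window's multiset is nonempty
theorem windowL_ne_nil (grid : List (List Int)) (i j k : Int)
    (hi0 : 0 ≤ i) (hik : i + k ≤ (grid.length : Int)) (hj0 : 0 ≤ j) (hk : 1 ≤ k)
    (hjk : j + k ≤ (((grid.headD []).length : Nat) : Int))
    (hrows : ∀ r ∈ grid, (grid.headD []).length ≤ r.length) :
    ((PySem.List.slice grid (some i) (some (i + k))).map
      (fun r => PySem.List.slice r (some j) (some (j + k)))).flatten ≠ [] := by
  have hsl : PySem.List.slice grid (some i) (some (i + k))
      = List.take ((i + k).toNat - i.toNat) (List.drop i.toNat grid) :=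
    PySem.List.slice_toNat grid hi0 (by omega)
  have hlen : (PySem.List.slice grid (some i) (some (i + k))).length ≠ 0 := by
    rw [hsl]
    simp only [List.length_take, List.length_drop]
    omega
  have hne : PySem.List.slice grid (some i) (some (i + k)) ≠ [] := by
    intro h; apply hlen; rw [h]; rfl
  obtain ⟨r, t, hrt⟩ := List.exists_cons_of_ne_nil hne
  intro hfl
  rw [List.flatten_eq_nil_iff] at hfl
  have hr : r ∈ PySem.List.slice grid (some i) (some (i + k)) := by rw [hrt]; simp
  have hrow := hfl (PySem.List.slice r (some j) (some (j + k))) (List.mem_map_of_mem hr)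
  have hrg : r ∈ grid := PySem.List.mem_of_mem_slice grid _ _ hr
  have hrl : ((grid.headD []).length : Int) ≤ (r.length : Int) := by
    exact_mod_cast hrows r hrg
  have : (PySem.List.slice r (some j) (some (j + k))).length = 0 := by rw [hrow]; rfl
  rw [PySem.List.slice_toNat r hj0 (by omega)] at this
  simp only [List.length_take, List.length_drop] at this
  omega

-- ===== VERDICT (by name: the statement is the Claim_ definition above) =====
theorem minAbsDiff_spec : Claim_equal_minAbsDiff := by
  intro grid k _hdom hpre
  obtain ⟨hgne, hk, hrowsImp⟩ := hpre
  unfold Spec_minAbsDiff minAbsDiff minAbsDiff_alt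
  simp only [PySem.List.foldl_append_singleton_eq_map, List.nil_append]
  apply List.map_congr_left
  intro i hi
  apply List.map_congr_left
  intro j hj
  rw [PySem.List.mem_pyRange_one] at hi hj
  have hrows := hrowsImp ⟨by omega, by omega⟩
  have hik : i + k ≤ (grid.length : Int) := by omega
  have hjk : j + k ≤ (((grid.headD []).length : Nat) : Int) := by omega
  rw [windowNums_eq grid i j k hi.1 hik hj.1 hk hjk hrows]
  have hA : ∀ ns : List Int,
      (PySem.List.pyRange 1 (ns.length : Int) 1).foldl (fun c z =>
        some (match c with
          | none => PySem.List.pyGetD ns z 0 - PySem.List.pyGetD ns (z - 1) 0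
          | some v => min v (PySem.List.pyGetD ns z 0 - PySem.List.pyGetD ns (z - 1) 0))) none
      = (pvGaps ns).foldl pvMstep none := by
    intro ns
    rw [← pvGapsA ns, List.foldl_map]
    rfl
  rw [hA]
  rw [pvPairScan_eq_gapScan]
  exact windowA_eq _ (windowL_ne_nil grid i j k hi.1 hik hj.1 hk hjk hrows)
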